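-- pv_equiv track=rewrite | github.com/Yearfield/decision_tree_app | reference/compute_parent_depth_score.py | compute_parent_depth_score
-- ===== SOURCE A (Python) =====
-- def compute_parent_depth_score(nodes, parent_id=None, depth=0, scores=None):
--     """
--     Recursively compute the depth score of each node in a tree.
--
--     Args:
--         nodes (dict): Mapping of node_id -> node dict, where each node may have "parent" and "children".
--         parent_id (str): The current parent node id being processed.
--         depth (int): Current depth in the tree.
--         scores (dict): Accumulator for depth scores.
--
--     Returns:
--         dict: Mapping of node_id -> depth score
--     """
--     if scores is None:
--         scores = {}
--
--     for node_id, node in nodes.items():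
--         if node.get("parent") == parent_id:
--             scores[node_id] = depth
--             # Recursively compute for children
--             compute_parent_depth_score(nodes, parent_id=node_id, depth=depth + 1, scores=scores)
--
--     return scores
-- ===== SOURCE B (Python) =====
-- def compute_parent_depth_score(nodes, parent_id=None, depth=0, scores=None):
--     # Build a parent->children index in one pass, then run an ITERATIVE
--     # depth-first traversal with an explicit stack (no recursion, no rescans).
--     # Children are pushed reversed so that popping from the end yields the
--     # same preorder (and hence the same dict insertion order) as the original.
--     # Mutates `scores` in place and returns it, like the original.
--     if scores is None:
--         scores = {}
--     children = {}
--     for node_id, node in nodes.items():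
--         children.setdefault(node.get("parent"), []).append(node_id)
--     stack = [(node_id, depth) for node_id in reversed(children.get(parent_id, []))]
--     while stack:
--         node_id, d = stack.pop()
--         scores[node_id] = d
--         stack.extend((child, d + 1) for child in reversed(children.get(node_id, [])))
--     return scores
-- ===== Notes on version B (the rewrite author's own statement) =====
-- stated objective: alternative
-- what changed: A rescans the whole nodes dict at every recursive call; B builds a parent->children index once and replaces the recursion by an iterative explicit-stack depth-first traversal over that index.
import Mathlib
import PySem

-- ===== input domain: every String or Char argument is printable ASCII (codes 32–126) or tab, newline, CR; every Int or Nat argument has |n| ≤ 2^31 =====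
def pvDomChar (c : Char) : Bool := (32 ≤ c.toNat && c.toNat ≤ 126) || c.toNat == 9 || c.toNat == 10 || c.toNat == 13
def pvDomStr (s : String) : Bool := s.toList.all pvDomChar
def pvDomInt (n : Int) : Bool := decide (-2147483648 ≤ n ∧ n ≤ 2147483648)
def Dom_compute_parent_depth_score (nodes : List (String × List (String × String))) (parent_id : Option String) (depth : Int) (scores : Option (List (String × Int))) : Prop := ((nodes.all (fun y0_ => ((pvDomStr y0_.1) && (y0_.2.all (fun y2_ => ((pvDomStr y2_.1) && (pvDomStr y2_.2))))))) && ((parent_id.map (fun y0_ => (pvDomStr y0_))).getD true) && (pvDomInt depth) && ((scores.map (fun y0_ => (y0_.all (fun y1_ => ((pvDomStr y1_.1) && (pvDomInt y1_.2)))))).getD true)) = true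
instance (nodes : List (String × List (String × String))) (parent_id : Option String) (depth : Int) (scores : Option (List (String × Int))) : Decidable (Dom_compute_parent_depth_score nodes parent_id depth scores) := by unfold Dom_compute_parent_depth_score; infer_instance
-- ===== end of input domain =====

-- B replaces A's recursion-with-full-rescan by a parent→children index built once
-- followed by an ITERATIVE explicit-stack depth-first traversal (objective: alternative).
-- Both A and B mutate the caller's `scores` dict in place; the theorems here are
-- about the returned value.

-- ===== PORT A =====
-- A's recursion: for each node whose "parent" equals pid, record depth and recurse.
-- The fuel (nodes.length + 1) only makes the recursion total; under
-- Pre_compute_parent_depth_score (acyclic parent pointers) it is never exhausted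
-- before Python's recursion bottoms out.
def pdsGoA (nodes : List (String × List (String × String))) :
    Nat → Option String → Int → PySem.Dict String Int → PySem.Dict String Int
  | 0, _, _, sc => sc
  | fuel+1, pid, depth, sc =>
      nodes.foldl (fun sc p =>
        if (PySem.Dict.mk p.2).get? "parent" = pid then
          pdsGoA nodes fuel (some p.1) (depth + 1) (sc.insert p.1 depth)
        else sc) sc

def compute_parent_depth_score (nodes : List (String × List (String × String))) (parent_id : Option String) (depth : Int) (scores : Option (List (String × Int))) : List (String × Int) :=
  (pdsGoA nodes (nodes.length + 1) parent_id depth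
      (PySem.Dict.mk (scores.getD []))).items

-- ===== PORT B =====
-- children.setdefault(node.get("parent"), []).append(node_id), once over nodes
def pdsChildren (nodes : List (String × List (String × String))) :
    PySem.Dict (Option String) (List String) :=
  nodes.foldl (fun d p => d.modify ((PySem.Dict.mk p.2).get? "parent") [] (· ++ [p.1]))
    PySem.Dict.empty

-- the children index looked up at pid is exactly the ids of nodes whose parent is pid, in order
-- (cited by the termination argument of pdsStackRun below, and by the proofs)
theorem pdsChildren_getD (nodes : List (String × List (String × String))) (pid : Option String) :
    (pdsChildren nodes).getD pid []
      = ((nodes.map (fun p => ((PySem.Dict.mk p.2).get? "parent", p.1))).filter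
          (fun q => q.1 == pid)).map (·.2) := by
  unfold pdsChildren
  have hmap : List.foldl (fun d p =>
        d.modify ((PySem.Dict.mk p.2).get? "parent") [] (· ++ [p.1])) PySem.Dict.empty nodes
      = List.foldl (fun d (q : Option String × String) => d.modify q.1 [] (· ++ [q.2]))
          PySem.Dict.empty
          (nodes.map (fun p => ((PySem.Dict.mk p.2).get? "parent", p.1))) := by
    rw [List.foldl_map]
  rw [hmap, PySem.Dict.getD_foldl_modify_append]
  simp

theorem pdsChildren_len (nodes : List (String × List (String × String))) (pid : Option String) :
    ((pdsChildren nodes).getD pid []).length ≤ nodes.length := by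
  rw [pdsChildren_getD]
  calc (((nodes.map (fun p => ((PySem.Dict.mk p.2).get? "parent", p.1))).filter
          (fun q => q.1 == pid)).map (·.2)).length
      = ((nodes.map (fun p => ((PySem.Dict.mk p.2).get? "parent", p.1))).filter
          (fun q => q.1 == pid)).length := List.length_map ..
    _ ≤ (nodes.map (fun p => ((PySem.Dict.mk p.2).get? "parent", p.1))).length :=
        List.length_filter_le _ _
    _ = nodes.length := List.length_map ..

-- weight of a pending stack: each entry with fuel f costs (N+1)^f (termination measure)
def pdsWeight (N : Nat) (es : List (String × Int × Nat)) : Nat :=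
  (es.map (fun e => (N + 1) ^ e.2.2)).sum

-- the `while stack:` loop of B: pop the top entry, record its depth, push its
-- children (head of the Lean list = top of Python's pop-from-the-end stack, so
-- Python's reversed() push is pushing the children in order at the front here).
-- The per-entry fuel only makes the loop total, exactly as in A's port.
def pdsStackRun (nodes : List (String × List (String × String))) :
    List (String × Int × Nat) → PySem.Dict String Int → PySem.Dict String Int
  | [], sc => sc
  | (nid, d, 0) :: rest, sc => pdsStackRun nodes rest (sc.insert nid d)
  | (nid, d, f+1) :: rest, sc =>
      pdsStackRun nodes
        (((pdsChildren nodes).getD (some nid) []).map (fun c => (c, d + 1, f)) ++ rest)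
        (sc.insert nid d)
  termination_by es _ => pdsWeight nodes.length es
  decreasing_by
  · simp [pdsWeight]
  · simp only [pdsWeight, List.map_append, List.sum_append, List.map_map,
      List.map_cons, List.sum_cons]
    have hlen := pdsChildren_len nodes (some nid)
    have hone : 1 ≤ (nodes.length + 1) ^ f := Nat.one_le_pow _ _ (Nat.succ_pos _)
    have hconst : ((((pdsChildren nodes).getD (some nid) []).map
        ((fun e => (nodes.length + 1) ^ e.2.2) ∘ (fun c => (c, d + 1, f)))).sum)
        = ((pdsChildren nodes).getD (some nid) []).length * (nodes.length + 1) ^ f := by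
      simp [Function.comp_def]
    rw [hconst, pow_succ]
    have hmul := Nat.mul_le_mul_right ((nodes.length + 1) ^ f) hlen
    nlinarith

def compute_parent_depth_score_alt (nodes : List (String × List (String × String))) (parent_id : Option String) (depth : Int) (scores : Option (List (String × Int))) : List (String × Int) :=
  (pdsStackRun nodes
      (((pdsChildren nodes).getD parent_id []).map (fun c => (c, depth, nodes.length)))
      (PySem.Dict.mk (scores.getD []))).items

-- ===== PRECONDITION & SPEC =====
-- one step up the parent graph (only parents that are themselves node ids continue a chain)
def pdsStep (nodes : List (String × List (String × String))) (o : Option String) : Option String :=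
  match o with
  | none => none
  | some i =>
    match (PySem.Dict.mk nodes).get? i with
    | none => none
    | some node =>
      match (PySem.Dict.mk node).get? "parent" with
      | none => none
      | some p => if p ∈ nodes.map Prod.fst then some p else none

-- parent_id does not lie on a parent-pointer cycle (following parents from it
-- never returns to it); when it does, Python A's recursion never terminates
def pdsNoCycleFrom (nodes : List (String × List (String × String))) (parent_id : Option String) : Bool :=
  match parent_id with
  | none => true
  | some p => (List.range nodes.length).all
      (fun k => decide ((pdsStep nodes)^[k + 1] (some p) ≠ some p))

-- Pre_ excludes (a) duplicate keys in `nodes`, in a node dict or in `scores` —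
-- such lists do not represent a Python dict, which has unique keys — and
-- (b) the inputs whose parent_id lies on a parent-pointer cycle, exactly those
-- on which Python A raises RecursionError (and Python B loops).
def Pre_compute_parent_depth_score (nodes : List (String × List (String × String))) (parent_id : Option String) (depth : Int) (scores : Option (List (String × Int))) : Prop :=
  (nodes.map Prod.fst).Nodup ∧
  (∀ p ∈ nodes, (p.2.map Prod.fst).Nodup) ∧
  ((scores.getD []).map Prod.fst).Nodup ∧
  pdsNoCycleFrom nodes parent_id = true
instance (nodes : List (String × List (String × String))) (parent_id : Option String) (depth : Int) (scores : Option (List (String × Int))) : Decidable (Pre_compute_parent_depth_score nodes parent_id depth scores) := by unfold Pre_compute_parent_depth_score; infer_instance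

def pvWitness_compute_parent_depth_score : (List (String × List (String × String))) × Option String × Int × (Option (List (String × Int))) :=
  ([("a", []), ("b", [("parent", "a")]), ("c", [("parent", "a")])], none, 0, none)

def Spec_compute_parent_depth_score (nodes : List (String × List (String × String))) (parent_id : Option String) (depth : Int) (scores : Option (List (String × Int))) (out : List (String × Int)) : Prop := out = compute_parent_depth_score_alt nodes parent_id depth scores
instance (nodes : List (String × List (String × String))) (parent_id : Option String) (depth : Int) (scores : Option (List (String × Int))) (out : List (String × Int)) : Decidable (Spec_compute_parent_depth_score nodes parent_id depth scores out) := by unfold Spec_compute_parent_depth_score; infer_instance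

-- ===== CLAIM (what is proved, stated in full; the proofs are below) =====
def Claim_equal_compute_parent_depth_score : Prop := ∀ (nodes : List (String × List (String × String))) (parent_id : Option String) (depth : Int) (scores : Option (List (String × Int))), Dom_compute_parent_depth_score nodes parent_id depth scores → Pre_compute_parent_depth_score nodes parent_id depth scores → Spec_compute_parent_depth_score nodes parent_id depth scores (compute_parent_depth_score nodes parent_id depth scores)

-- ===== LEMMAS AND PROOFS =====

-- proof-side recursive reference form (DFS by structural recursion on fuel over the index)
def pdsRec (nodes : List (String × List (String × String))) :
    Nat → Option String → Int → PySem.Dict String Int → PySem.Dict String Int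
  | 0, _, _, sc => sc
  | fuel+1, pid, d, sc =>
      ((pdsChildren nodes).getD pid []).foldl (fun sc nid =>
        pdsRec nodes fuel (some nid) (d + 1) (sc.insert nid d)) sc

-- the effect of running a list of stack entries sequentially, in recursive form
def pdsSeq (nodes : List (String × List (String × String)))
    (es : List (String × Int × Nat)) (sc : PySem.Dict String Int) : PySem.Dict String Int :=
  es.foldl (fun sc e => pdsRec nodes e.2.2 (some e.1) (e.2.1 + 1) (sc.insert e.1 e.2.1)) sc

-- A's guarded fold over all nodes is the plain fold over pid's children
theorem pdsA_fold_filter (nodes : List (String × List (String × String)))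
    (G : PySem.Dict String Int → String → PySem.Dict String Int) (pid : Option String)
    (sc : PySem.Dict String Int) :
    nodes.foldl (fun sc p =>
        if (PySem.Dict.mk p.2).get? "parent" = pid then G sc p.1 else sc) sc
      = (((nodes.map (fun p => ((PySem.Dict.mk p.2).get? "parent", p.1))).filter
          (fun q => q.1 == pid)).map (·.2)).foldl G sc := by
  induction nodes generalizing sc with
  | nil => rfl
  | cons hd tl ih =>
    simp only [List.foldl_cons, List.map_cons, List.filter_cons]
    by_cases h : (PySem.Dict.mk hd.2).get? "parent" = pid
    · simp [h, ih]
    · simp [h, ih]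

-- A's recursion equals the recursive reference form at every fuel
theorem pdsGoA_eq_pdsRec (nodes : List (String × List (String × String))) (fuel : Nat) :
    ∀ (pid : Option String) (d : Int) (sc : PySem.Dict String Int),
      pdsGoA nodes fuel pid d sc = pdsRec nodes fuel pid d sc := by
  induction fuel with
  | zero => intro pid d sc; rfl
  | succ fuel ih =>
    intro pid d sc
    show nodes.foldl (fun sc p =>
        if (PySem.Dict.mk p.2).get? "parent" = pid then
          pdsGoA nodes fuel (some p.1) (d + 1) (sc.insert p.1 d)
        else sc) sc
      = ((pdsChildren nodes).getD pid []).foldl (fun sc nid =>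
          pdsRec nodes fuel (some nid) (d + 1) (sc.insert nid d)) sc
    rw [pdsA_fold_filter nodes
        (fun sc nid => pdsGoA nodes fuel (some nid) (d + 1) (sc.insert nid d)) pid sc,
      pdsChildren_getD]
    refine PySem.List.foldl_congr_mem _ _ _ _ ?_
    intro sc' nid _
    rw [ih]

-- one level of the reference recursion, as a pdsSeq over the children entries
theorem pdsRec_succ_seq (nodes : List (String × List (String × String))) (fuel : Nat)
    (pid : Option String) (d : Int) (sc : PySem.Dict String Int) :
    pdsRec nodes (fuel + 1) pid d sc
      = pdsSeq nodes (((pdsChildren nodes).getD pid []).map (fun c => (c, d, fuel))) sc := by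
  show ((pdsChildren nodes).getD pid []).foldl (fun sc nid =>
          pdsRec nodes fuel (some nid) (d + 1) (sc.insert nid d)) sc = _
  unfold pdsSeq
  rw [List.foldl_map]

-- key lemma: the stack machine run on es ++ rest is the sequential effect of es
-- followed by the run on rest (strong induction on the weight of es)
theorem pdsStackRun_append (nodes : List (String × List (String × String))) :
    ∀ (w : Nat) (es rest : List (String × Int × Nat)) (sc : PySem.Dict String Int),
      pdsWeight nodes.length es ≤ w →
      pdsStackRun nodes (es ++ rest) sc = pdsStackRun nodes rest (pdsSeq nodes es sc) := by
  intro w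
  induction w with
  | zero =>
    intro es rest sc hw
    cases es with
    | nil => rfl
    | cons e es' =>
      exfalso
      have hone : 1 ≤ (nodes.length + 1) ^ e.2.2 := Nat.one_le_pow _ _ (Nat.succ_pos _)
      simp only [pdsWeight, List.map_cons, List.sum_cons, Nat.le_zero] at hw
      have : 1 ≤ (nodes.length + 1) ^ e.2.2 := Nat.one_le_pow _ _ (Nat.succ_pos _)
      omega
  | succ w ih =>
    intro es rest sc hw
    cases es with
    | nil => rfl
    | cons e es' =>
      obtain ⟨nid, d, f⟩ := e
      cases f with
      | zero =>
        have h1 : pdsStackRun nodes (((nid, d, 0) :: es') ++ rest) sc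
            = pdsStackRun nodes (es' ++ rest) (sc.insert nid d) := by
          simp [pdsStackRun]
        rw [h1, ih es' rest (sc.insert nid d) (by
          simp only [pdsWeight, List.map_cons, List.sum_cons, pow_zero] at hw ⊢; omega)]
        rfl
      | succ f =>
        have kidsdef : pdsStackRun nodes (((nid, d, f+1) :: es') ++ rest) sc
            = pdsStackRun nodes
                ((((pdsChildren nodes).getD (some nid) []).map (fun c => (c, d + 1, f)) ++ es')
                  ++ rest) (sc.insert nid d) := by
          simp [pdsStackRun]
        have hkidsw : pdsWeight nodes.length
            (((pdsChildren nodes).getD (some nid) []).map (fun c => (c, d + 1, f)) ++ es') ≤ w := by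
          have hlen := pdsChildren_len nodes (some nid)
          have hone : 1 ≤ (nodes.length + 1) ^ f := Nat.one_le_pow _ _ (Nat.succ_pos _)
          simp only [pdsWeight, List.map_append, List.sum_append, List.map_map,
            List.map_cons, List.sum_cons] at hw ⊢
          have hconst : ((((pdsChildren nodes).getD (some nid) []).map
              ((fun e => (nodes.length + 1) ^ e.2.2) ∘ (fun c => (c, d + 1, f)))).sum)
              = ((pdsChildren nodes).getD (some nid) []).length * (nodes.length + 1) ^ f := by
            simp [Function.comp_def]
          rw [hconst]
          have hmul := Nat.mul_le_mul_right ((nodes.length + 1) ^ f) hlen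
          rw [pow_succ] at hw
          nlinarith
        rw [kidsdef, ih _ rest (sc.insert nid d) hkidsw]
        have hseq : pdsSeq nodes
            (((pdsChildren nodes).getD (some nid) []).map (fun c => (c, d + 1, f)) ++ es')
            (sc.insert nid d)
            = pdsSeq nodes ((nid, d, f+1) :: es') sc := by
          unfold pdsSeq
          rw [List.foldl_append, List.foldl_cons]
          congr 1
          rw [← pdsSeq, ← pdsRec_succ_seq]
        rw [hseq]

-- ===== VERDICT (by name: the statement is the Claim_ definition above) =====
theorem compute_parent_depth_score_spec : Claim_equal_compute_parent_depth_score := by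
  intro nodes parent_id depth scores _ _
  unfold Spec_compute_parent_depth_score compute_parent_depth_score compute_parent_depth_score_alt
  rw [pdsGoA_eq_pdsRec]
  have h := pdsStackRun_append nodes
      (pdsWeight nodes.length
        (((pdsChildren nodes).getD parent_id []).map (fun c => (c, depth, nodes.length))))
      (((pdsChildren nodes).getD parent_id []).map (fun c => (c, depth, nodes.length)))
      [] (PySem.Dict.mk (scores.getD [])) (le_refl _)
  rw [List.append_nil] at h
  rw [h]
  rw [pdsRec_succ_seq]
  simp [pdsStackRun]
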